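/- GENERATED by farm/mkstatement.py from design/units.tsv (unit `inverse_mdct.7b`) and the assertions of Vorbis/Spec/MdctTop7.lean — do not edit.
   THE STATEMENT of the proof unit `inverse_mdct.7b`: segment 7b of `inverse_mdct` (18 instructions; entries 0x109963;
   exits 0x109adb; ranges 0x109963-0x1099b4)
   takes each of its entry assertions to one of its exit assertions (`Vorbis.Spec.inverse_mdct.Seg7b`), given the contracts of its callees.
   What the names mean: Vorbis/Spec/Basic.lean (the shared hypotheses), Vorbis/Spec/MdctTop7.lean (the assertions). The theorem to prove:
   `theorem inverse_mdct_7b_ok : Vorbis.Spec.inverse_mdct_7b.Statement`. -/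
import Vorbis.Spec.MdctTop7
namespace Vorbis.Spec.inverse_mdct_7b
open X86 X86.User Asan

/-- The statement of unit `inverse_mdct.7b`. -/
def Statement : Prop :=
  ∀ (Lay : Layout) (_hLay : Lay.hi = 0x1000000) (μ : Microarch) (_hμ : UserX.MicroOK μ) (u₀ : State)
    (_hcode : HasCodeNat Lay u₀ Vorbis.L.inverse_mdct.entry Vorbis.Code.code_inverse_mdct.nat Vorbis.L.inverse_mdct.size)
    (_h_asan_load8_noabort : Asan.SmallCheck Lay μ Vorbis.WayInv (Vorbis.CodeOK u₀) [.rax, .rcx, .rdx] 8 Vorbis.L.__asan_load8_noabort.entry),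
    Vorbis.Spec.inverse_mdct.Seg7b Lay μ u₀

end Vorbis.Spec.inverse_mdct_7b
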